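-- pv_equiv track=rewrite | github.com/yoo-chris/Python-programmers | Lv0/공 던지기.py | solution
-- ===== SOURCE A (Python) =====
-- def solution(numbers, k):
--     answer = 0
--     i = 0
--     while k > 1:
--         i += 2
--         if i >= len(numbers):
--             i = i % len(numbers)
--         k -= 1
--     return numbers[i]
-- ===== SOURCE B (Python) =====
-- def solution(numbers, k):
--     return numbers[2 * max(k - 1, 0) % len(numbers)]
-- ===== Notes on version B (the rewrite author's own statement) =====
-- stated objective: faster
-- what changed: Replaces the k-1 step while-loop with the closed-form index 2*max(k-1,0) % len(numbers).
import Mathlib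
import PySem

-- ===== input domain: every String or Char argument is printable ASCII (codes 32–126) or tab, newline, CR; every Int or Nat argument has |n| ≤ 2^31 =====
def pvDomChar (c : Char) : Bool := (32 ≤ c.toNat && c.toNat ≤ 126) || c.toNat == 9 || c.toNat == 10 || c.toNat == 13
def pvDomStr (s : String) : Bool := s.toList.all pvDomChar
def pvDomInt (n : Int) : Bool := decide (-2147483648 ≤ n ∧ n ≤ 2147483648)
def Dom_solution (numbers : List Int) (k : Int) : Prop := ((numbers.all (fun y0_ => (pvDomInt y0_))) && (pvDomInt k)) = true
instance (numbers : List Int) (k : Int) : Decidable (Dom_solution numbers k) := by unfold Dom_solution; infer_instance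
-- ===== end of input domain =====

-- B replaces A's O(k) stepping loop by the closed-form index 2*max(k-1,0) % len(numbers) (O(1)).

-- ===== PORT A =====
-- the while loop: runs while k > 1, i.e. (k-1).toNat times; each pass does i += 2 then reduces mod len if needed
def solutionLoopA (len : Int) : Nat → Int → Int
  | 0, i => i
  | m + 1, i =>
      let i' := i + 2
      solutionLoopA len m (if i' ≥ len then PySem.Int.mod i' len else i')

def solution (numbers : List Int) (k : Int) : Int :=
  let i := solutionLoopA (numbers.length : Int) (k - 1).toNat 0
  (PySem.List.pyGet? numbers i).getD 0   -- Pre_ guarantees the index is in range (none never occurs)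

-- ===== PORT B =====
def solution_alt (numbers : List Int) (k : Int) : Int :=
  (PySem.List.pyGet? numbers (PySem.Int.mod (2 * max (k - 1) 0) (numbers.length : Int))).getD 0

-- ===== PRECONDITION & SPEC =====
-- Pre_ excludes only numbers = [], where A raises (ZeroDivisionError or IndexError)
def Pre_solution (numbers : List Int) (k : Int) : Prop := numbers ≠ []
instance (numbers : List Int) (k : Int) : Decidable (Pre_solution numbers k) := by unfold Pre_solution; infer_instance
def pvWitness_solution : List Int × Int := ([1, 2, 3], 3)

def Spec_solution (numbers : List Int) (k : Int) (out : Int) : Prop := out = solution_alt numbers k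
instance (numbers : List Int) (k : Int) (out : Int) : Decidable (Spec_solution numbers k out) := by unfold Spec_solution; infer_instance

-- ===== CLAIM (what is proved, stated in full; the proofs are below) =====
def Claim_equal_solution : Prop := ∀ (numbers : List Int) (k : Int), Dom_solution numbers k → Pre_solution numbers k → Spec_solution numbers k (solution numbers k)

-- ===== LEMMAS AND PROOFS =====

-- loop invariant: starting from 0 ≤ i < n, after m passes the index is (i + 2*m) % n
theorem solutionLoopA_eq (n : Int) (hn : 0 < n) :
    ∀ (m : Nat) (i : Int), 0 ≤ i → i < n → solutionLoopA n m i = (i + 2 * m) % n := by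
  intro m
  induction m with
  | zero =>
      intro i h0 h1
      simp only [solutionLoopA, Nat.cast_zero, mul_zero, add_zero]
      exact (Int.emod_eq_of_lt h0 h1).symm
  | succ m ih =>
      intro i h0 h1
      simp only [solutionLoopA]
      by_cases h : i + 2 ≥ n
      · rw [if_pos h, PySem.Int.mod_eq_emod_of_pos hn,
          ih _ (Int.emod_nonneg _ (by omega)) (Int.emod_lt_of_pos _ hn)]
        conv_lhs => rw [Int.emod_add_emod]
        push_cast
        ring_nf
      · rw [if_neg h, ih _ (by omega) (by omega)]
        push_cast
        ring_nf

theorem solution_spec : Claim_equal_solution := by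
  intro numbers k _ hpre
  unfold Spec_solution solution solution_alt
  have hn : 0 < (numbers.length : Int) := by
    simpa using List.length_pos_iff.mpr hpre
  have harg : (0 : Int) + 2 * ((k - 1).toNat : Int) = 2 * max (k - 1) 0 := by omega
  rw [solutionLoopA_eq _ hn _ 0 le_rfl hn, harg, PySem.Int.mod_eq_emod_of_pos hn]
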